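-- pv_equiv track=rewrite | github.com/ashbob999/Advent-of-Code | 2024/day04.py | find
-- ===== SOURCE A (Python) =====
-- def check(g, word, x, y):
-- 	w = len(g[0])
-- 	h = len(g)
--
-- 	l = len(word)
--
-- 	found = []
--
-- 	if g[y][x] != word[0]:
-- 		return []
--
-- 	# right
-- 	if x+l <= w:
-- 		if all([word[i] == g[y][x+i] for i in range(l)]):
-- 			found.append(((x, y), 0))
--
-- 	# down
-- 	if y+l <= h:
-- 		if all([word[i] == g[y+i][x] for i in range(l)]):
-- 			found.append(((x, y), 1))
--
-- 	# up
-- 	if y - l >= -1: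
-- 		if all([word[i] == g[y-i][x] for i in range(l)]):
-- 			found.append(((x, y), 2))
--
-- 	# left
-- 	if x-l >= -1:
-- 		if all([word[i] == g[y][x-i] for i in range(l)]):
-- 			found.append(((x, y), 3))
--
-- 	# top left
-- 	if x-l >= -1 and y-l >= -1:
-- 		if all([word[i] == g[y-i][x-i] for i in range(l)]):
-- 			found.append(((x, y), 4))
--
-- 	# top right
-- 	if x+l <= w and y-l >= -1:
-- 		if all([word[i] == g[y-i][x+i] for i in range(l)]):
-- 			found.append(((x, y), 5))
--
-- 	# bottom left
-- 	if x-l >= -1 and y+l <= h: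
-- 		if all([word[i] == g[y+i][x-i] for i in range(l)]):
-- 			found.append(((x, y), 6))
--
-- 	# bottom right
-- 	if x+l <= w and y+l <= h:
-- 		if all([word[i] == g[y+i][x+i] for i in range(l)]):
-- 			found.append(((x,y), 7))
--
--
-- 	return found
--
-- def find(word, g):
-- 	found = []
-- 	w = len(g[0])
-- 	h = len(g)
--
-- 	for y in range(h):
-- 		for x in range(w):
-- 			found += check(g, word, x, y)
--
-- 	return found
-- ===== SOURCE B (Python) =====
-- # Direction-outer staged search: for each of the 8 direction codes, scan only the
-- # valid start positions (no per-cell bounds tests), index the hits in a dict keyed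
-- # by cell, then emit the results in grid-scan order from the index.
-- DIRS = [(1, 0), (0, 1), (0, -1), (-1, 0), (-1, -1), (1, -1), (-1, 1), (1, 1)]
--
-- def find(word, g):
--     w = len(g[0])
--     h = len(g)
--     l = len(word)
--     if l == 0:
--         return []
--     hits = {}
--     for code, (dx, dy) in enumerate(DIRS):
--         xs = range(w) if dx == 0 else (range(w - l + 1) if dx == 1 else range(l - 1, w))
--         ys = range(h) if dy == 0 else (range(h - l + 1) if dy == 1 else range(l - 1, h))
--         for y in ys:
--             for x in xs:
--                 if all(word[i] == g[y + dy * i][x + dx * i] for i in range(l)):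
--                     hits[(x, y)] = hits.get((x, y), []) + [code]
--     return [((x, y), c) for y in range(h) for x in range(w) for c in hits.get((x, y), [])]
-- ===== Notes on version B (the rewrite author's own statement) =====
-- stated objective: alternative
-- what changed: A probes all 8 directions from every cell with per-direction bounds guards and a word[0] early exit; B is a staged direction-outer search: for each direction it scans only the precomputed valid start ranges (no per-cell bounds tests), collects hits into a dict indexed by cell, and then emits the output in grid-scan order from that index.
import Mathlib
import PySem

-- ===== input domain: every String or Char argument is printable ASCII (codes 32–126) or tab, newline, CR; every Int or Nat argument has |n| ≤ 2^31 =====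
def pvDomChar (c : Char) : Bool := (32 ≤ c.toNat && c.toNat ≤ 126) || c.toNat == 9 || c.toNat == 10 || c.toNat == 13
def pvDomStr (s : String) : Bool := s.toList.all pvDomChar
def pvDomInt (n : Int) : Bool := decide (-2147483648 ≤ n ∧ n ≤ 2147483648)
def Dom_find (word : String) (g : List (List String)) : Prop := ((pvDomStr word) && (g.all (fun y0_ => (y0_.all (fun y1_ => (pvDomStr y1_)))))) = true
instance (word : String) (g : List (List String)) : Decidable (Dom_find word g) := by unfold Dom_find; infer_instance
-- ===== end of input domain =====

-- B replaces A's per-cell eight-branch probe by a staged, direction-outer search: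
-- for each direction it scans only the valid start positions (no per-cell bounds
-- tests and no word[0] early exit), indexes the hits in a dict keyed by cell, and
-- finally emits the results in grid-scan order from that index (objective: alternative).

-- shared primitive accessors: g[y][x] as a char list, word[i] as the 1-char string's char list
-- (defaults are never reached inside Pre_find; cell/word indices are guarded by the ports)
def pvCell (g : List (List String)) (y x : Int) : List Char :=
  (PySem.List.pyGetD (PySem.List.pyGetD g y []) x "").toList

def pvWch (word : String) (i : Int) : List Char :=
  [PySem.List.pyGetD word.toList i ' ']

-- ===== PORT A =====
def check (g : List (List String)) (word : String) (x y : Int) : List ((Int × Int) × Int) :=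
  let w : Int := PySem.List.len (PySem.List.pyGetD g 0 [])
  let h : Int := PySem.List.len g
  let l : Int := PySem.Str.len word
  if pvCell g y x ≠ pvWch word 0 then []
  else
    let found : List ((Int × Int) × Int) := []
    -- right
    let found := if x + l ≤ w then
        (if (PySem.List.pyRange 0 l 1).all (fun i => pvWch word i == pvCell g y (x + i)) then found ++ [((x, y), 0)] else found)
      else found
    -- down
    let found := if y + l ≤ h then
        (if (PySem.List.pyRange 0 l 1).all (fun i => pvWch word i == pvCell g (y + i) x) then found ++ [((x, y), 1)] else found)
      else found
    -- up
    let found := if y - l ≥ -1 then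
        (if (PySem.List.pyRange 0 l 1).all (fun i => pvWch word i == pvCell g (y - i) x) then found ++ [((x, y), 2)] else found)
      else found
    -- left
    let found := if x - l ≥ -1 then
        (if (PySem.List.pyRange 0 l 1).all (fun i => pvWch word i == pvCell g y (x - i)) then found ++ [((x, y), 3)] else found)
      else found
    -- top left
    let found := if x - l ≥ -1 ∧ y - l ≥ -1 then
        (if (PySem.List.pyRange 0 l 1).all (fun i => pvWch word i == pvCell g (y - i) (x - i)) then found ++ [((x, y), 4)] else found)
      else found
    -- top right
    let found := if x + l ≤ w ∧ y - l ≥ -1 then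
        (if (PySem.List.pyRange 0 l 1).all (fun i => pvWch word i == pvCell g (y - i) (x + i)) then found ++ [((x, y), 5)] else found)
      else found
    -- bottom left
    let found := if x - l ≥ -1 ∧ y + l ≤ h then
        (if (PySem.List.pyRange 0 l 1).all (fun i => pvWch word i == pvCell g (y + i) (x - i)) then found ++ [((x, y), 6)] else found)
      else found
    -- bottom right
    let found := if x + l ≤ w ∧ y + l ≤ h then
        (if (PySem.List.pyRange 0 l 1).all (fun i => pvWch word i == pvCell g (y + i) (x + i)) then found ++ [((x, y), 7)] else found)
      else found
    found

def find (word : String) (g : List (List String)) : List ((Int × Int) × Int) :=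
  let w : Int := PySem.List.len (PySem.List.pyGetD g 0 [])
  let h : Int := PySem.List.len g
  (PySem.List.pyRange 0 h 1).foldl (fun found y =>
    (PySem.List.pyRange 0 w 1).foldl (fun found x =>
      found ++ check g word x y) found) []

-- ===== PORT B =====
def pvDirs : List (Int × Int) := [(1, 0), (0, 1), (0, -1), (-1, 0), (-1, -1), (1, -1), (-1, 1), (1, 1)]

-- the valid start columns / rows for a direction (Source B's conditional range expressions)
def pvXs (w l dx : Int) : List Int :=
  if dx = 0 then PySem.List.pyRange 0 w 1
  else if dx = 1 then PySem.List.pyRange 0 (w - l + 1) 1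
  else PySem.List.pyRange (l - 1) w 1

def pvYs (h l dy : Int) : List Int :=
  if dy = 0 then PySem.List.pyRange 0 h 1
  else if dy = 1 then PySem.List.pyRange 0 (h - l + 1) 1
  else PySem.List.pyRange (l - 1) h 1

-- Source B's all(word[i] == g[y + dy*i][x + dx*i] for i in range(l))
def pvTestB (word : String) (g : List (List String)) (l dx dy x y : Int) : Bool :=
  (PySem.List.pyRange 0 l 1).all (fun i => pvWch word i == pvCell g (y + dy * i) (x + dx * i))

def find_alt (word : String) (g : List (List String)) : List ((Int × Int) × Int) :=
  let w : Int := PySem.List.len (PySem.List.pyGetD g 0 [])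
  let h : Int := PySem.List.len g
  let l : Int := PySem.Str.len word
  if l = 0 then []
  else
    let hits : PySem.Dict (Int × Int) (List Int) :=
      (PySem.List.enumerate pvDirs 0).foldl (fun hits cd =>
        (pvYs h l cd.2.2).foldl (fun hits y =>
          (pvXs w l cd.2.1).foldl (fun hits x =>
            if pvTestB word g l cd.2.1 cd.2.2 x y
            then hits.insert (x, y) (hits.getD (x, y) [] ++ [cd.1]) else hits) hits) hits)
        PySem.Dict.empty
    (PySem.List.pyRange 0 h 1).flatMap (fun y =>
      (PySem.List.pyRange 0 w 1).flatMap (fun x =>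
        (hits.getD (x, y) []).map (fun c => ((x, y), c))))

-- ===== PRECONDITION & SPEC =====
-- Pre_find is exactly where the Python A returns: g nonempty (else g[0] raises), and when the
-- first row is nonempty, a nonempty word (else word[0] raises) and no row shorter than the
-- first (else g[y][x] raises).
def Pre_find (word : String) (g : List (List String)) : Prop :=
  g ≠ [] ∧ ((g.headI).length = 0 ∨ (word.toList ≠ [] ∧ ∀ row ∈ g, (g.headI).length ≤ row.length))
instance (word : String) (g : List (List String)) : Decidable (Pre_find word g) := by unfold Pre_find; infer_instance

def pvWitness_find : String × List (List String) := ("AB", [["A", "B"], ["B", "A"]])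

def Spec_find (word : String) (g : List (List String)) (out : List ((Int × Int) × Int)) : Prop := out = find_alt word g
instance (word : String) (g : List (List String)) (out : List ((Int × Int) × Int)) : Decidable (Spec_find word g out) := by unfold Spec_find; infer_instance

-- ===== CLAIM (what is proved, stated in full; the proofs are below) =====
def Claim_equal_find : Prop := ∀ (word : String) (g : List (List String)), Dom_find word g → Pre_find word g → Spec_find word g (find word g)

-- ===== LEMMAS AND PROOFS =====

-- generic list facts about guarded singletons
theorem pv_flatMap_single {γ : Type} (l : List Int) (hnd : l.Nodup) (f : Int → List γ) (x : Int)
    (hf : ∀ a, a ≠ x → f a = []) : l.flatMap f = if x ∈ l then f x else [] := by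
  induction l with
  | nil => simp
  | cons a t ih =>
    have hnd' := hnd.of_cons
    by_cases hax : a = x
    · subst hax
      have hxt : a ∉ t := (List.nodup_cons.mp hnd).1
      simp [List.flatMap_cons, ih hnd', hxt]
    · have hxa : ¬ (x = a) := fun h => hax h.symm
      simp only [List.flatMap_cons, hf a hax, List.nil_append, ih hnd', List.mem_cons,
        or_iff_right hxa]

theorem pv_fm (p : Prop) [Decidable p] (k : Int × Int) (c : Int) (key : Int × Int) :
    ((if p then [(k, c)] else []).filter (fun q => q.1 == key)).map (·.2)
      = if p ∧ k = key then [c] else [] := by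
  by_cases hp : p
  · by_cases hk : k = key
    · simp [hp, hk]
    · simp [hp, hk]
  · simp [hp]

theorem pvXs_nodup (w l dx : Int) : (pvXs w l dx).Nodup := by
  unfold pvXs; split_ifs <;> exact PySem.List.nodup_pyRange_one _ _

theorem pvYs_nodup (h l dy : Int) : (pvYs h l dy).Nodup := by
  unfold pvYs; split_ifs <;> exact PySem.List.nodup_pyRange_one _ _

-- B's per-direction guarded update, as a list of (key, code) updates
def pvUpd (word : String) (g : List (List String)) (w h l : Int) : List ((Int × Int) × Int) :=
  (PySem.List.enumerate pvDirs 0).flatMap (fun cd =>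
    (pvYs h l cd.2.2).flatMap (fun y =>
      (pvXs w l cd.2.1).flatMap (fun x =>
        if pvTestB word g l cd.2.1 cd.2.2 x y then [((x, y), cd.1)] else [])))

theorem pv_hits_eq (word : String) (g : List (List String)) (w h l : Int) :
    (PySem.List.enumerate pvDirs 0).foldl (fun hits cd =>
        (pvYs h l cd.2.2).foldl (fun hits y =>
          (pvXs w l cd.2.1).foldl (fun hits x =>
            if pvTestB word g l cd.2.1 cd.2.2 x y
            then hits.insert (x, y) (hits.getD (x, y) [] ++ [cd.1]) else hits) hits) hits)
        (PySem.Dict.empty : PySem.Dict (Int × Int) (List Int))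
      = (pvUpd word g w h l).foldl (fun d p => d.modify p.1 [] (· ++ [p.2])) PySem.Dict.empty := by
  unfold pvUpd
  simp only [List.foldl_flatMap]
  apply PySem.List.foldl_congr_mem
  intro d cd _
  apply PySem.List.foldl_congr_mem
  intro d2 y _
  apply PySem.List.foldl_congr_mem
  intro d3 x _
  by_cases h : pvTestB word g l cd.2.1 cd.2.2 x y
  · simp only [if_pos h, List.foldl_cons, List.foldl_nil]; rfl
  · simp only [if_neg h, List.foldl_nil]

theorem pv_getD_upd (word : String) (g : List (List String)) (w h l : Int) (x y : Int) :
    ((pvUpd word g w h l).foldl (fun d p => d.modify p.1 [] (· ++ [p.2]))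
        (PySem.Dict.empty : PySem.Dict (Int × Int) (List Int))).getD (x, y) []
      = (PySem.List.enumerate pvDirs 0).flatMap (fun cd =>
          if y ∈ pvYs h l cd.2.2 ∧ x ∈ pvXs w l cd.2.1 ∧ pvTestB word g l cd.2.1 cd.2.2 x y
          then [cd.1] else []) := by
  rw [PySem.Dict.getD_foldl_modify_append]
  simp only [PySem.Dict.getD_empty, List.nil_append]
  unfold pvUpd
  simp only [List.filter_flatMap, List.map_flatMap]
  apply List.flatMap_congr
  intro cd _
  have hinner : ∀ y', ((pvXs w l cd.2.1).flatMap (fun x' =>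
      ((if pvTestB word g l cd.2.1 cd.2.2 x' y' then [((x', y'), cd.1)] else []).filter
        (fun q => q.1 == (x, y))).map (·.2)))
      = if y' = y ∧ x ∈ pvXs w l cd.2.1 ∧ pvTestB word g l cd.2.1 cd.2.2 x y' then [cd.1] else [] := by
    intro y'
    rw [pv_flatMap_single _ (pvXs_nodup w l cd.2.1) _ x]
    · by_cases hm : x ∈ pvXs w l cd.2.1
      · rw [if_pos hm, pv_fm]
        by_cases ht : pvTestB word g l cd.2.1 cd.2.2 x y'
        · by_cases hy : y' = y
          · subst hy; simp [ht, hm]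
          · simp [ht, hy, Prod.ext_iff]
        · simp [ht]
      · simp [hm]
    · intro a ha
      rw [pv_fm, if_neg]
      rintro ⟨-, h2⟩
      exact ha (congrArg Prod.fst h2)
  rw [List.flatMap_congr (fun y' _ => hinner y')]
  rw [pv_flatMap_single _ (pvYs_nodup h l cd.2.2) _ y]
  · by_cases hym : y ∈ pvYs h l cd.2.2
    · rw [if_pos hym]
      by_cases hc : x ∈ pvXs w l cd.2.1 ∧ pvTestB word g l cd.2.1 cd.2.2 x y
      · rw [if_pos ⟨rfl, hc⟩, if_pos ⟨hym, hc⟩]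
      · rw [if_neg (fun hh => hc hh.2), if_neg (fun hh => hc ⟨hh.2.1, hh.2.2⟩)]
    · rw [if_neg hym, if_neg (fun hh => hym hh.1)]
  · intro a ha
    rw [if_neg]
    rintro ⟨h1, -⟩
    exact ha h1

-- a guarded append step equals appending a guarded singleton
theorem pv_append_if_if {α : Type} (acc : List α) (c : Prop) [Decidable c] (b : Bool) (e : α) :
    (if c then (if b then acc ++ [e] else acc) else acc)
      = acc ++ (if c then (if b then [e] else []) else []) := by
  split_ifs <;> simp

-- A's check as a flat concatenation of guarded singletons
theorem pv_check_eq (word : String) (g : List (List String)) (x y : Int) :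
    check g word x y
      = (if pvCell g y x ≠ pvWch word 0 then []
         else
           (if x + PySem.Str.len word ≤ PySem.List.len (PySem.List.pyGetD g 0 []) then (if (PySem.List.pyRange 0 (PySem.Str.len word) 1).all (fun i => pvWch word i == pvCell g y (x + i)) then [((x, y), 0)] else []) else [])
           ++ (if y + PySem.Str.len word ≤ PySem.List.len g then (if (PySem.List.pyRange 0 (PySem.Str.len word) 1).all (fun i => pvWch word i == pvCell g (y + i) x) then [((x, y), 1)] else []) else [])
           ++ (if y - PySem.Str.len word ≥ -1 then (if (PySem.List.pyRange 0 (PySem.Str.len word) 1).all (fun i => pvWch word i == pvCell g (y - i) x) then [((x, y), 2)] else []) else [])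
           ++ (if x - PySem.Str.len word ≥ -1 then (if (PySem.List.pyRange 0 (PySem.Str.len word) 1).all (fun i => pvWch word i == pvCell g y (x - i)) then [((x, y), 3)] else []) else [])
           ++ (if x - PySem.Str.len word ≥ -1 ∧ y - PySem.Str.len word ≥ -1 then (if (PySem.List.pyRange 0 (PySem.Str.len word) 1).all (fun i => pvWch word i == pvCell g (y - i) (x - i)) then [((x, y), 4)] else []) else [])
           ++ (if x + PySem.Str.len word ≤ PySem.List.len (PySem.List.pyGetD g 0 []) ∧ y - PySem.Str.len word ≥ -1 then (if (PySem.List.pyRange 0 (PySem.Str.len word) 1).all (fun i => pvWch word i == pvCell g (y - i) (x + i)) then [((x, y), 5)] else []) else [])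
           ++ (if x - PySem.Str.len word ≥ -1 ∧ y + PySem.Str.len word ≤ PySem.List.len g then (if (PySem.List.pyRange 0 (PySem.Str.len word) 1).all (fun i => pvWch word i == pvCell g (y + i) (x - i)) then [((x, y), 6)] else []) else [])
           ++ (if x + PySem.Str.len word ≤ PySem.List.len (PySem.List.pyGetD g 0 []) ∧ y + PySem.Str.len word ≤ PySem.List.len g then (if (PySem.List.pyRange 0 (PySem.Str.len word) 1).all (fun i => pvWch word i == pvCell g (y + i) (x + i)) then [((x, y), 7)] else []) else [])) := by
  by_cases hc : pvCell g y x ≠ pvWch word 0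
  · simp only [check, if_pos hc]
  · simp only [check, if_neg hc]
    rw [pv_append_if_if, pv_append_if_if, pv_append_if_if, pv_append_if_if,
      pv_append_if_if, pv_append_if_if, pv_append_if_if, pv_append_if_if]
    simp [List.append_assoc]

theorem pvXs_zero (w l : Int) : pvXs w l 0 = PySem.List.pyRange 0 w 1 := by norm_num [pvXs]
theorem pvXs_one (w l : Int) : pvXs w l 1 = PySem.List.pyRange 0 (w - l + 1) 1 := by norm_num [pvXs]
theorem pvXs_neg (w l : Int) : pvXs w l (-1) = PySem.List.pyRange (l - 1) w 1 := by norm_num [pvXs]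
theorem pvYs_zero (h l : Int) : pvYs h l 0 = PySem.List.pyRange 0 h 1 := by norm_num [pvYs]
theorem pvYs_one (h l : Int) : pvYs h l 1 = PySem.List.pyRange 0 (h - l + 1) 1 := by norm_num [pvYs]
theorem pvYs_neg (h l : Int) : pvYs h l (-1) = PySem.List.pyRange (l - 1) h 1 := by norm_num [pvYs]

theorem pv_testB_false (word : String) (g : List (List String)) (l dx dy x y : Int)
    (hl : 1 ≤ l) (hc : pvCell g y x ≠ pvWch word 0) :
    pvTestB word g l dx dy x y = false := by
  unfold pvTestB
  rw [PySem.List.pyRange_one_cons (show (0:Int) < l by omega)]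
  simp [List.all_cons]
  intro h
  exact absurd h.symm hc

theorem pv_dir_eq (cA cB1 cB2 : Prop) [Decidable cA] [Decidable cB1] [Decidable cB2]
    (bA bB : Bool) (xy : Int × Int) (c : Int) (hc : cA ↔ (cB1 ∧ cB2)) (hb : bA = bB) :
    (if cA then (if bA then [(xy, c)] else []) else [])
      = (if cB1 ∧ cB2 ∧ bB = true then [c] else []).map (fun cc => (xy, cc)) := by
  by_cases h1 : cB1 <;> by_cases h2 : cB2 <;> by_cases h3 : bB <;>
    simp [hc, hb, h1, h2, h3]

theorem pv_cell_main (word : String) (g : List (List String)) (x y : Int)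
    (hl : 1 ≤ PySem.Str.len word)
    (hx0 : 0 ≤ x) (hxw : x < PySem.List.len (PySem.List.pyGetD g 0 []))
    (hy0 : 0 ≤ y) (hyh : y < PySem.List.len g) :
    check g word x y
      = ((PySem.List.enumerate pvDirs 0).flatMap (fun cd =>
          if y ∈ pvYs (PySem.List.len g) (PySem.Str.len word) cd.2.2
              ∧ x ∈ pvXs (PySem.List.len (PySem.List.pyGetD g 0 [])) (PySem.Str.len word) cd.2.1
              ∧ pvTestB word g (PySem.Str.len word) cd.2.1 cd.2.2 x y
          then [cd.1] else [])).map (fun c => ((x, y), c)) := by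
  have hdirs : PySem.List.enumerate pvDirs 0
      = [(0,(1,0)),(1,(0,1)),(2,(0,-1)),(3,(-1,0)),(4,(-1,-1)),(5,(1,-1)),(6,(-1,1)),(7,(1,1))] := by decide
  rw [pv_check_eq, hdirs]
  simp only [List.flatMap_cons, List.flatMap_nil, List.append_nil, List.map_append,
    pvXs_zero, pvXs_one, pvXs_neg, pvYs_zero, pvYs_one, pvYs_neg]
  simp only [← List.append_assoc]
  by_cases hcell : pvCell g y x ≠ pvWch word 0
  · rw [if_pos hcell]
    have ht : ∀ dx dy : Int, pvTestB word g ((word.length : Int)) dx dy x y = false := by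
      intro dx dy
      have h2 := pv_testB_false word g (PySem.Str.len word) dx dy x y hl hcell
      simpa using h2
    simp [ht]
  · rw [if_neg hcell]
    refine congrArg₂ (· ++ ·) ?_ (pv_dir_eq _ _ _ _ _ _ _ ?_ ?_)
    refine congrArg₂ (· ++ ·) ?_ (pv_dir_eq _ _ _ _ _ _ _ ?_ ?_)
    refine congrArg₂ (· ++ ·) ?_ (pv_dir_eq _ _ _ _ _ _ _ ?_ ?_)
    refine congrArg₂ (· ++ ·) ?_ (pv_dir_eq _ _ _ _ _ _ _ ?_ ?_)
    refine congrArg₂ (· ++ ·) ?_ (pv_dir_eq _ _ _ _ _ _ _ ?_ ?_)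
    refine congrArg₂ (· ++ ·) ?_ (pv_dir_eq _ _ _ _ _ _ _ ?_ ?_)
    refine congrArg₂ (· ++ ·) ?_ (pv_dir_eq _ _ _ _ _ _ _ ?_ ?_)
    refine pv_dir_eq _ _ _ _ _ _ _ ?_ ?_
    all_goals first
      | (simp only [PySem.List.mem_pyRange_one]; omega)
      | (simp [pvTestB, sub_eq_add_neg])

theorem pv_w_eq (g : List (List String)) :
    PySem.List.len (PySem.List.pyGetD g 0 []) = (g.headI.length : Int) := by
  cases g <;> simp [PySem.List.pyGetD_zero, List.headI]

-- ===== VERDICT (by name: the statement is the Claim_ definition above) =====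
theorem find_spec : Claim_equal_find := by
  intro word g _hD hPre
  unfold Spec_find
  by_cases hl0 : PySem.Str.len word = 0
  · have hw0 : g.headI.length = 0 := by
      rcases hPre.2 with h | h
      · exact h
      · exfalso
        apply h.1
        rw [PySem.Str.len_eq] at hl0
        exact List.eq_nil_of_length_eq_zero (by exact_mod_cast hl0)
    have hw : PySem.List.len (PySem.List.pyGetD g 0 []) = 0 := by
      rw [pv_w_eq, hw0]; rfl
    have hr : PySem.List.pyRange 0 0 1 = ([] : List Int) := by decide
    have hword : word = "" := by
      rw [PySem.Str.len_eq] at hl0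
      exact String.toList_eq_nil_iff.mp (List.eq_nil_of_length_eq_zero (by exact_mod_cast hl0))
    have hB : find_alt word g = [] := by
      subst hword
      simp [find_alt]
    have hA : find word g = [] := by
      simp only [find, hw, hr, List.foldl_nil]
      exact List.foldl_fixed _
    rw [hA, hB]
  · have hl : 1 ≤ PySem.Str.len word := by
      rw [PySem.Str.len_eq] at hl0 ⊢
      omega
    have hA : find word g
        = (PySem.List.pyRange 0 (PySem.List.len g) 1).flatMap (fun y =>
            (PySem.List.pyRange 0 (PySem.List.len (PySem.List.pyGetD g 0 [])) 1).flatMap (fun x =>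
              check g word x y)) := by
      unfold find
      calc (PySem.List.pyRange 0 (PySem.List.len g) 1).foldl (fun found y =>
              (PySem.List.pyRange 0 (PySem.List.len (PySem.List.pyGetD g 0 [])) 1).foldl (fun found x =>
                found ++ check g word x y) found) []
          = (PySem.List.pyRange 0 (PySem.List.len g) 1).foldl (fun found y =>
              found ++ (PySem.List.pyRange 0 (PySem.List.len (PySem.List.pyGetD g 0 [])) 1).flatMap (fun x =>
                check g word x y)) [] := by
            apply PySem.List.foldl_congr_mem
            intro acc y _
            exact PySem.List.foldl_append_eq_flatMap _ _ _
        _ = _ := by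
            rw [PySem.List.foldl_append_eq_flatMap]
            simp
    have hB : find_alt word g
        = (PySem.List.pyRange 0 (PySem.List.len g) 1).flatMap (fun y =>
            (PySem.List.pyRange 0 (PySem.List.len (PySem.List.pyGetD g 0 [])) 1).flatMap (fun x =>
              (((pvUpd word g (PySem.List.len (PySem.List.pyGetD g 0 [])) (PySem.List.len g) (PySem.Str.len word)).foldl
                  (fun d p => d.modify p.1 [] (· ++ [p.2])) PySem.Dict.empty).getD (x, y) []).map (fun c => ((x, y), c)))) := by
      unfold find_alt
      rw [if_neg hl0, pv_hits_eq]
    rw [hA, hB]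
    apply List.flatMap_congr
    intro y hy
    apply List.flatMap_congr
    intro x hx
    rw [PySem.List.mem_pyRange_one] at hy hx
    rw [pv_getD_upd, ← pv_cell_main word g x y hl hx.1 hx.2 hy.1 hy.2]
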